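-- pv_equiv track=rewrite | github.com/breivens/scriptingtalen | additional exercise series/series_08 [Python]/D/Dumas Cipher.py | cipherkey
-- ===== SOURCE A (Python) =====
-- def cipherkey(keytext: str):
--     keytext = [char.upper() for char in keytext if char not in (' ', '\t', '\n')]
--     key = dict()
--     for index, letter in enumerate(keytext):
--         if letter not in key:
--             key[letter] = list()
--         key[letter].append(index + 1)
--     return key
-- ===== SOURCE B (Python) =====
-- def cipherkey(keytext: str):
--     clean = [c.upper() for c in keytext if c not in (' ', '\t', '\n')]
--     return {letter: [i + 1 for i, c in enumerate(clean) if c == letter]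
--             for letter in dict.fromkeys(clean)}
-- ===== Notes on version B (the rewrite author's own statement) =====
-- stated objective: simpler
-- what changed: Replaces the stateful dict-building loop (conditional key initialisation + per-element append) with a declarative dict comprehension over the distinct cleaned letters, rescanning the cleaned list once per distinct letter for its 1-based positions.
import Mathlib
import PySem

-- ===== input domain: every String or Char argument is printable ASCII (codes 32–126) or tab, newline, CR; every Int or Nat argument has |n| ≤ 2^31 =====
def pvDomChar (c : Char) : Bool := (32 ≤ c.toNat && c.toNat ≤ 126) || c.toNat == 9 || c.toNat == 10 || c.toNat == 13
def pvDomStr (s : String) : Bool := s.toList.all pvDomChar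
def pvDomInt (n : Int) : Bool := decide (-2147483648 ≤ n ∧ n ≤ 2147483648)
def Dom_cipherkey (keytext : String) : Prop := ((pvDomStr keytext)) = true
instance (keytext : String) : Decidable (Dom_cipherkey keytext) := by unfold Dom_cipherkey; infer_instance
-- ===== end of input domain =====

-- B replaces A's stateful dict-building loop by a comprehension over the distinct cleaned
-- letters (per-letter rescan of the cleaned list for positions); same return value, simpler.

-- ===== PORT A =====
-- keytext = [char.upper() for char in keytext if char not in (' ', '\t', '\n')]
def pvClean (keytext : String) : List String :=
  (keytext.toList.filter (fun c => !(c == ' ' || c == '\t' || c == '\n'))).map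
    (fun c => PySem.Str.upper (String.ofList [c]))

def cipherkey (keytext : String) : List (String × List Int) :=
  let cleaned := pvClean keytext
  let key : PySem.Dict String (List Int) :=
    (PySem.List.enumerate cleaned).foldl
      (fun d p =>
        let d := if d.contains p.2 then d else d.insert p.2 []  -- if letter not in key: key[letter] = list()
        d.modify p.2 [] (fun v => v ++ [p.1 + 1]))              -- key[letter].append(index + 1)
      PySem.Dict.empty
  key.items

-- ===== PORT B =====
def cipherkey_alt (keytext : String) : List (String × List Int) :=
  let clean := pvClean keytext
  (PySem.List.dedup clean).map (fun letter =>
    (letter, (PySem.List.enumerate clean).filterMap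
      (fun p => if p.2 == letter then some (p.1 + 1) else none)))

-- ===== PRECONDITION & SPEC =====
def Spec_cipherkey (keytext : String) (out : List (String × List Int)) : Prop := out = cipherkey_alt keytext
instance (keytext : String) (out : List (String × List Int)) : Decidable (Spec_cipherkey keytext out) := by unfold Spec_cipherkey; infer_instance

-- ===== CLAIM (what is proved, stated in full; the proofs are below) =====
def Claim_equal_cipherkey : Prop := ∀ (keytext : String), Dom_cipherkey keytext → Spec_cipherkey keytext (cipherkey keytext)

-- ===== LEMMAS AND PROOFS =====

-- A's loop body (conditional fresh insert, then append) equals the modify-with-default step.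
theorem pv_step_eq (d : PySem.Dict String (List Int)) (l : String) (v : Int) :
    (if d.contains l then d else d.insert l []).modify l [] (fun xs => xs ++ [v])
      = d.modify l [] (fun xs => xs ++ [v]) := by
  by_cases h : d.contains l
  · simp [h]
  · simp only [h, Bool.false_eq_true, if_false]
    simp only [PySem.Dict.modify, PySem.Dict.getD_insert_self, List.nil_append]
    rw [PySem.Dict.insert_insert_self]
    congr 1
    simp [pysem, h]

-- the value A's modify-loop accumulates at key k = B's comprehension for k
theorem pv_getD_foldl (l : List (Int × String)) (k : String)
    (d : PySem.Dict String (List Int)) :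
    (l.foldl (fun d p => d.modify p.2 [] (fun v => v ++ [p.1 + 1])) d).getD k []
      = d.getD k [] ++ l.filterMap (fun p => if p.2 == k then some (p.1 + 1) else none) := by
  induction l generalizing d with
  | nil => simp
  | cons x xs ih =>
    simp only [List.foldl_cons, List.filterMap_cons, ih, PySem.Dict.getD_modify]
    by_cases h : k = x.2
    · simp [h]
    · have hb : (x.2 == k) = false := by simpa using Ne.symm h
      simp [if_neg h, hb]

-- ===== VERDICT (by name: the statement is the Claim_ definition above) =====
theorem cipherkey_spec : Claim_equal_cipherkey := by
  intro keytext _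
  unfold Spec_cipherkey cipherkey cipherkey_alt
  simp only []
  set clean := pvClean keytext with hclean
  have hstep : (fun (d : PySem.Dict String (List Int)) (p : Int × String) =>
        (if d.contains p.2 then d else d.insert p.2 []).modify p.2 [] (fun v => v ++ [p.1 + 1]))
      = fun d p => d.modify p.2 [] (fun v => v ++ [p.1 + 1]) := by
    funext d p; exact pv_step_eq d p.2 (p.1 + 1)
  rw [hstep]
  set D := (PySem.List.enumerate clean).foldl
      (fun d p => d.modify p.2 [] (fun v => v ++ [p.1 + 1])) PySem.Dict.empty with hD
  have hnodup : D.keys.Nodup := by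
    rw [hD]
    exact PySem.Dict.nodup_keys_foldl_modify_key (PySem.List.enumerate clean)
      (fun p => p.2) [] (fun _ p => fun v => v ++ [p.1 + 1]) PySem.Dict.empty (by simp)
  have hkeys : D.keys = PySem.List.dedup clean := by
    rw [hD]
    have h2 := PySem.Dict.keys_foldl_modify_key (PySem.List.enumerate clean)
      (fun p : Int × String => p.2) ([] : List Int)
      (fun _ p => fun v => v ++ [p.1 + 1]) PySem.Dict.empty
    exact h2.trans (by simp [pysem])
  rw [PySem.Dict.items_eq_map_keys D hnodup [], hkeys]
  refine List.map_congr_left ?_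
  intro k _
  rw [hD, pv_getD_foldl]
  simp
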